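-- pv_equiv track=rewrite | github.com/claudiofrancesconi/chipcoin | src/chipcoin/node/service.py | _worst_operator_status
-- ===== SOURCE A (Python) =====
-- def _worst_operator_status(statuses) -> str:
--     """Return the most severe operator-check status."""
--
--     rank = {"ok": 0, "warn": 1, "fail": 2}
--     worst = "ok"
--     for status in statuses:
--         value = str(status)
--         if rank.get(value, 2) > rank[worst]:
--             worst = value if value in rank else "fail"
--     return worst
-- ===== SOURCE B (Python) =====
-- def _worst_operator_status(statuses) -> str:
--     """Return the most severe operator-check status."""
--     values = [str(s) for s in statuses]
--     if any(v not in ("ok", "warn") for v in values):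
--         return "fail"
--     if "warn" in values:
--         return "warn"
--     return "ok"
-- ===== Notes on version B (the rewrite author's own statement) =====
-- stated objective: simpler
-- what changed: Replaced the max-by-rank accumulator loop over a rank dict with a short-circuiting membership cascade: 'fail' if any status falls outside {'ok','warn'} (which covers literal 'fail' and any unknown status), else 'warn' if present, else 'ok'.
import Mathlib
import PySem

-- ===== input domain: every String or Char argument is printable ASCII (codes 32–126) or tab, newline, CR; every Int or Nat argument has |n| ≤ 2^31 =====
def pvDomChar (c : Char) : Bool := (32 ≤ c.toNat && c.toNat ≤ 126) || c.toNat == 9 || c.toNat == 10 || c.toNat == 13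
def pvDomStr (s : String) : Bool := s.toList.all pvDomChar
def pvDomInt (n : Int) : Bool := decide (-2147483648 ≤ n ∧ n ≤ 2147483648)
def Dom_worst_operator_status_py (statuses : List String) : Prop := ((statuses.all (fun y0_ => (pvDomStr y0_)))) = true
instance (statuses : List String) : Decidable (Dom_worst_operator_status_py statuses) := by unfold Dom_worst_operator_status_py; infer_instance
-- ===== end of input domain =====

-- B replaces A's max-by-rank accumulator loop with a short-circuiting membership cascade (simpler decomposition, same cost).


-- ===== PORT A =====
def pvRank : PySem.Dict String Int := PySem.Dict.ofList [("ok", 0), ("warn", 1), ("fail", 2)]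

-- literal port of A's loop; str(status) on a string is the string itself; rank[worst] never raises
-- because worst is always one of the three keys, so it is ported as get? followed by getD 0 (default unreachable)
def worst_operator_status_py (statuses : List String) : String :=
  statuses.foldl (fun worst status =>
    let value := status
    if PySem.Dict.getD pvRank value 2 > (PySem.Dict.get? pvRank worst).getD 0 then
      (if PySem.Dict.contains pvRank value then value else "fail")
    else worst) "ok"

-- ===== PORT B =====
def worst_operator_status_py_alt (statuses : List String) : String :=
  let values := statuses.map (fun s => s)
  if values.any (fun v => !(v == "ok" || v == "warn")) then "fail"
  else if values.contains "warn" then "warn"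
  else "ok"

-- ===== PRECONDITION & SPEC =====
def Spec_worst_operator_status_py (statuses : List String) (out : String) : Prop := out = worst_operator_status_py_alt statuses
instance (statuses : List String) (out : String) : Decidable (Spec_worst_operator_status_py statuses out) := by unfold Spec_worst_operator_status_py; infer_instance

-- ===== CLAIM (what is proved, stated in full; the proofs are below) =====
def Claim_equal_worst_operator_status_py : Prop := ∀ (statuses : List String), Dom_worst_operator_status_py statuses → Spec_worst_operator_status_py statuses (worst_operator_status_py statuses)

-- ===== LEMMAS AND PROOFS =====

-- the loop body of A's port, named for the invariant lemma
def pvStep (worst status : String) : String :=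
  let value := status
  if PySem.Dict.getD pvRank value 2 > (PySem.Dict.get? pvRank worst).getD 0 then
    (if PySem.Dict.contains pvRank value then value else "fail")
  else worst

-- a status strictly worse than "warn" (anything outside {"ok","warn"})
def pvBad (v : String) : Bool := !(v == "ok" || v == "warn")

lemma pvRank_eq : pvRank = PySem.Dict.mk [("ok", 0), ("warn", 1), ("fail", 2)] := by decide

lemma pvStep_eval (w s : String) (hw : w = "ok" ∨ w = "warn" ∨ w = "fail") :
    pvStep w s =
      if pvBad s then "fail"
      else if s = "warn" ∧ w = "ok" then "warn"
      else w := by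
  rcases hw with hw | hw | hw <;> subst hw <;>
    by_cases hok : "ok" = s <;> by_cases hwa : "warn" = s <;> by_cases hfa : "fail" = s <;>
      simp_all [pvStep, pvBad, pvRank_eq, PySem.Dict.getD, PySem.Dict.get?,
        PySem.Dict.contains] <;>
      (try subst_vars) <;> (try simp_all [List.find?]) <;> tauto

-- fold invariant: result from each reachable accumulator state
lemma pvFold_inv (l : List String) :
    l.foldl pvStep "fail" = "fail" ∧
    l.foldl pvStep "warn" = (if l.any pvBad then "fail" else "warn") ∧
    l.foldl pvStep "ok" =
      (if l.any pvBad then "fail" else if l.contains "warn" then "warn" else "ok") := by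
  induction l with
  | nil => simp
  | cons s t ih =>
    obtain ⟨h1, h2, h3⟩ := ih
    have eok := pvStep_eval "ok" s (Or.inl rfl)
    have ewa := pvStep_eval "warn" s (Or.inr (Or.inl rfl))
    have efa := pvStep_eval "fail" s (Or.inr (Or.inr rfl))
    by_cases hb : pvBad s = true <;> by_cases hw : s = "warn" <;>
      simp_all [List.foldl_cons, pvBad]

-- ===== VERDICT (by name: the statement is the Claim_ definition above) =====
theorem worst_operator_status_py_spec : Claim_equal_worst_operator_status_py := by
  intro statuses _
  unfold Spec_worst_operator_status_py worst_operator_status_py worst_operator_status_py_alt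
  have h := (pvFold_inv statuses).2.2
  simpa [List.map_id', pvStep, pvBad] using h
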